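-- pv_equiv track=rewrite | github.com/Crispy-xt/lib-for-pku-courses | 计算概论（B）/代码/Spreadsheets.py | trans_2
-- ===== SOURCE A (Python) =====
-- def trans_2(coordinate):
--     for i in range(len(coordinate)):
--         if coordinate[i].isdigit():
--             letters = coordinate[:i]
--             row = coordinate[i:]
--             break
--     n = len(letters)
--     column = 0
--     for i in range(n):
--         column += (ord(letters[i]) - 64) * (26 ** (n - i - 1))
--     return f"R{row}C{column}"
-- ===== SOURCE B (Python) =====
-- def trans_2(coordinate):
--     column = 0
--     for i, c in enumerate(coordinate):
--         if c.isdigit():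
--             row = coordinate[i:]
--             break
--         column = column * 26 + (ord(c) - 64)
--     return f"R{row}C{column}"
-- ===== Notes on version B (the rewrite author's own statement) =====
-- stated objective: simpler
-- what changed: B replaces A's two passes (find-and-slice the letter prefix, then sum (ord-64)*26**(n-i-1) with explicit powers) by one left-to-right pass that accumulates the column with Horner's rule and stops at the first digit.
import Mathlib
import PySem

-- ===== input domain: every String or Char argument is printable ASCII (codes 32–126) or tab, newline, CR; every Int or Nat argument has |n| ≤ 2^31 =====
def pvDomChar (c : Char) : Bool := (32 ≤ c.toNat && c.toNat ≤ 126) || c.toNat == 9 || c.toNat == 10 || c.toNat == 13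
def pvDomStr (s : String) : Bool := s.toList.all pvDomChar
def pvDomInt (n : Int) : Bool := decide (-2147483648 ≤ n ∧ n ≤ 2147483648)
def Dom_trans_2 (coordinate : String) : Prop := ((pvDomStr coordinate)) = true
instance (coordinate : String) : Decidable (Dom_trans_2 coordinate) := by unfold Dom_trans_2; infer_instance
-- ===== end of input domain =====

-- B replaces A's two passes (find/slice the letter prefix, then a power sum) by a single
-- Horner-rule pass; same return value wherever A returns (both raise NameError outside Pre_).

-- ===== PORT A =====
-- A's first loop: scan indices left to right; at the first digit, letters = coordinate[:i],
-- row = coordinate[i:]. The accumulator `seen` is exactly coordinate[:i] (the slice for a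
-- nonnegative in-range index), the suffix is coordinate[i:]; none = no digit (A raises NameError).
def trans_2_split (seen : List Char) : List Char → Option (List Char × List Char)
  | [] => none
  | c :: rest =>
    if PySem.Chars.isdigit c then some (seen, c :: rest)
    else trans_2_split (seen ++ [c]) rest

-- A's second loop: column += (ord(letters[i]) - 64) * 26**(n-i-1) for i in range(n)
def trans_2_col (letters : List Char) : Int :=
  (List.range letters.length).foldl
    (fun column i =>
      column + ((letters.getD i ' ').toNat - 64 : Int) * (26 : Int) ^ (letters.length - i - 1)) 0

def trans_2 (coordinate : String) : String :=
  match trans_2_split [] coordinate.toList with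
  | none => ""   -- unreachable under Pre_trans_2: Python raises NameError here
  | some (letters, row) =>
      "R" ++ String.ofList row ++ "C" ++ PySem.Int.toStr (trans_2_col letters)

-- ===== PORT B =====
-- B's single loop: Horner accumulation until the first digit, then the f-string.
def trans_2_alt_loop (column : Int) : List Char → String
  | [] => ""   -- unreachable under Pre_trans_2: Python raises NameError here
  | c :: rest =>
    if PySem.Chars.isdigit c then
      "R" ++ String.ofList (c :: rest) ++ "C" ++ PySem.Int.toStr column
    else trans_2_alt_loop (column * 26 + ((c.toNat : Int) - 64)) rest

def trans_2_alt (coordinate : String) : String :=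
  trans_2_alt_loop 0 coordinate.toList

-- ===== PRECONDITION & SPEC =====
-- Pre_ excludes exactly the inputs with no digit character, on which A (and B) raise NameError.
def Pre_trans_2 (coordinate : String) : Prop :=
  coordinate.toList.any (fun c => PySem.Chars.isdigit c) = true
instance (coordinate : String) : Decidable (Pre_trans_2 coordinate) := by
  unfold Pre_trans_2; infer_instance
def pvWitness_trans_2 : String := "AB12"

def Spec_trans_2 (coordinate : String) (out : String) : Prop := out = trans_2_alt coordinate
instance (coordinate : String) (out : String) : Decidable (Spec_trans_2 coordinate out) := by
  unfold Spec_trans_2; infer_instance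

-- ===== CLAIM (what is proved, stated in full; the proofs are below) =====
def Claim_equal_trans_2 : Prop := ∀ (coordinate : String), Dom_trans_2 coordinate → Pre_trans_2 coordinate → Spec_trans_2 coordinate (trans_2 coordinate)

-- ===== LEMMAS AND PROOFS =====

-- Horner fold with an arbitrary start value
def pvHorner (a : Int) (l : List Char) : Int :=
  l.foldl (fun column c => column * 26 + ((c.toNat : Int) - 64)) a

lemma pvHorner_shift (l : List Char) (a : Int) :
    pvHorner a l = a * (26 : Int) ^ l.length + pvHorner 0 l := by
  induction l generalizing a with
  | nil => simp [pvHorner]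
  | cons c t ih =>
    simp only [pvHorner, List.foldl_cons, List.length_cons] at *
    rw [ih (a * 26 + _), ih (0 * 26 + _)]
    ring

-- A's power-sum loop equals the Horner fold
lemma pvCol_eq_horner (l : List Char) : trans_2_col l = pvHorner 0 l := by
  induction l with
  | nil => simp [trans_2_col, pvHorner]
  | cons c t ih =>
    have hc : trans_2_col (c :: t) =
        ((c.toNat : Int) - 64) * 26 ^ t.length + trans_2_col t := by
      simp only [trans_2_col, PySem.List.foldl_add, zero_add, List.length_cons,
        List.range_succ_eq_map, List.map_cons, List.map_map, List.sum_cons]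
      simp [Function.comp_def, Nat.succ_sub_succ]
    have hh : pvHorner 0 (c :: t) = ((c.toNat : Int) - 64) * 26 ^ t.length + pvHorner 0 t := by
      show pvHorner (0 * 26 + ((c.toNat : Int) - 64)) t = _
      rw [pvHorner_shift]; ring
    rw [hc, hh, ih]

-- main invariant: A's split-then-render equals B's loop, given the Horner value of `seen`
lemma pvMain (cs : List Char) : ∀ (seen : List Char),
    (match trans_2_split seen cs with
     | none => ""
     | some (letters, row) =>
         "R" ++ String.ofList row ++ "C" ++ PySem.Int.toStr (trans_2_col letters)) =
    trans_2_alt_loop (pvHorner 0 seen) cs := by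
  induction cs with
  | nil => intro seen; simp [trans_2_split, trans_2_alt_loop]
  | cons c t ih =>
    intro seen
    simp only [trans_2_split, trans_2_alt_loop]
    by_cases h : PySem.Chars.isdigit c = true
    · simp [h, pvCol_eq_horner]
    · simp only [h, if_neg, Bool.not_eq_true] at *
      rw [ih (seen ++ [c])]
      have : pvHorner 0 (seen ++ [c]) = pvHorner 0 seen * 26 + ((c.toNat : Int) - 64) := by
        simp [pvHorner]
      simp [this]

-- ===== VERDICT (by name: the statement is the Claim_ definition above) =====
theorem trans_2_spec : Claim_equal_trans_2 := by
  intro coordinate _ _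
  unfold Spec_trans_2 trans_2 trans_2_alt
  have := pvMain coordinate.toList []
  simpa [pvHorner] using this
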